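-- pv_equiv track=rewrite | github.com/cipherboy/hash_framework | hash_framework/boolean/core.py | b_tobitl
-- ===== SOURCE A (Python) =====
-- def b_tobitl(num):
--     r = []
--     for i in range(31, -1, -1):
--         if (int(num) & 2**(i)) == (2**i):
--             r.append('T')
--         else:
--             r.append('F')
--     return r
-- ===== SOURCE B (Python) =====
-- def b_tobitl(num):
--     s = format(int(num) & 0xFFFFFFFF, '032b')
--     return ['T' if c == '1' else 'F' for c in s]
-- ===== Notes on version B (the rewrite author's own statement) =====
-- stated objective: idiomatic
-- what changed: Replaces the per-bit power-of-two AND-test loop with a single masked binary-string conversion (format(num & 0xFFFFFFFF, '032b')) followed by a character-to-flag map.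
import Mathlib
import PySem

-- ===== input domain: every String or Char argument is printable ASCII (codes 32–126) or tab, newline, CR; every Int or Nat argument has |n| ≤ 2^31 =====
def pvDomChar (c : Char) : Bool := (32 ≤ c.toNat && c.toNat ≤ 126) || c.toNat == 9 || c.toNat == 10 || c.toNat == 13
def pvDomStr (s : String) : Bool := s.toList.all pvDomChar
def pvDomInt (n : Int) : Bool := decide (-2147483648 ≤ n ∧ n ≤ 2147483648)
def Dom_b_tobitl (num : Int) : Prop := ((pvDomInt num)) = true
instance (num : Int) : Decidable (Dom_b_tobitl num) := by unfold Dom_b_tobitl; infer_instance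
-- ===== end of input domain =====

-- B replaces A's per-bit power-of-two AND-test loop by one masked
-- binary-string conversion (format(num & 0xFFFFFFFF, '032b')) mapped char-by-char to 'T'/'F'
-- (objective: idiomatic; return value only, no mutation).

-- ===== PORT A =====
-- `int(num)` is the identity on an int; `2**i` with i from range(31,-1,-1) is (2:ℤ)^i.toNat (i ≥ 0 throughout).
def b_tobitl (num : Int) : List String :=
  (PySem.List.pyRange 31 (-1) (-1)).foldl
    (fun r i => r ++ [if PySem.Int.band num ((2:ℤ) ^ i.toNat) = (2:ℤ) ^ i.toNat then "T" else "F"]) []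

-- ===== PORT B =====
-- format(x, '032b') = the binary digits (PySem.Int.toBinChars; x ≥ 0 here) left-padded with '0' to width 32.
def b_tobitl_alt (num : Int) : List String :=
  let s := PySem.Int.toBinChars (PySem.Int.band num 4294967295)
  let padded := List.replicate (32 - s.length) '0' ++ s
  padded.map (fun c => if c = '1' then "T" else "F")

-- ===== PRECONDITION & SPEC =====
def Spec_b_tobitl (num : Int) (out : List String) : Prop := out = b_tobitl_alt num
instance (num : Int) (out : List String) : Decidable (Spec_b_tobitl num out) := by unfold Spec_b_tobitl; infer_instance

-- ===== CLAIM (what is proved, stated in full; the proofs are below) =====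
def Claim_equal_b_tobitl : Prop := ∀ (num : Int), Dom_b_tobitl num → Spec_b_tobitl num (b_tobitl num)

-- ===== LEMMAS AND PROOFS =====

-- Python's bit i of num (infinite two's complement).
def pvBit (num : Int) (i : Nat) : Bool :=
  if 0 ≤ num then num.toNat.testBit i else !((-num - 1).toNat.testBit i)

-- binary digits of n, MSB first, empty for 0 (proof-side mirror of Nat.toDigits 2)
def pvBdigs : Nat → List Char
  | 0 => []
  | n + 1 =>
    pvBdigs ((n + 1) / 2) ++ [if (n + 1) % 2 = 1 then '1' else '0']
decreasing_by exact Nat.div_lt_self (Nat.succ_pos n) (by norm_num)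

lemma pvBdigs_pos (n : Nat) (h : 0 < n) :
    pvBdigs n = pvBdigs (n / 2) ++ [if n % 2 = 1 then '1' else '0'] := by
  obtain ⟨m, rfl⟩ := Nat.exists_eq_add_of_lt h
  simp only [Nat.zero_add]
  rw [pvBdigs]

lemma pvA_bit (num : Int) (i : Nat) :
    (PySem.Int.band num ((2:ℤ) ^ i) = (2:ℤ) ^ i) ↔ pvBit num i = true := by
  have hp : ((2:ℤ) ^ i) = ((2 ^ i : ℕ) : ℤ) := by push_cast; ring
  have hpnn : (0:ℤ) ≤ (2:ℤ) ^ i := by positivity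
  have hpne : (0:ℤ) ≠ (2:ℤ) ^ i := (by positivity : (0:ℤ) < 2 ^ i).ne
  unfold PySem.Int.band pvBit
  by_cases h : 0 ≤ num
  · simp only [h, if_pos, if_pos hpnn]
    rw [hp, Int.toNat_natCast, Nat.and_two_pow]
    cases hb : num.toNat.testBit i <;> simp [hpne]
  · simp only [h, if_pos hpnn]
    rw [hp, Int.toNat_natCast, Nat.two_pow_and]
    cases hb : (-num - 1).toNat.testBit i <;> simp [hpne]

lemma pvB_bit (num : Int) (i : Nat) (hi : i < 32) :
    ((PySem.Int.band num 4294967295).toNat).testBit i = pvBit num i := by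
  have hm : (4294967295 : ℤ) = ((2 ^ 32 - 1 : ℕ) : ℤ) := by norm_num
  unfold PySem.Int.band pvBit
  by_cases h : 0 ≤ num
  · simp only [h, if_pos, show (0:ℤ) ≤ 4294967295 by norm_num]
    rw [hm, Int.toNat_natCast, Int.toNat_natCast, Nat.and_two_pow_sub_one_eq_mod,
      Nat.testBit_mod_two_pow]
    simp [hi]
  · simp only [h, if_pos (show (0:ℤ) ≤ 4294967295 by norm_num)]
    simp only [if_false]
    rw [hm, Int.toNat_natCast, Int.toNat_natCast, Nat.and_comm, Nat.and_two_pow_sub_one_eq_mod]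
    have hlt : (-num - 1).toNat % 2 ^ 32 < 2 ^ 32 := Nat.mod_lt _ (by norm_num)
    have : 2 ^ 32 - 1 - (-num - 1).toNat % 2 ^ 32 = 2 ^ 32 - ((-num - 1).toNat % 2 ^ 32 + 1) := by
      omega
    rw [this, Nat.testBit_two_pow_sub_succ hlt, Nat.testBit_mod_two_pow]
    simp [hi]

lemma pvA_cond (num : Int) (i : Nat) :
    (if PySem.Int.band num ((2:ℤ) ^ i) = (2:ℤ) ^ i then "T" else "F")
      = (if pvBit num i then "T" else "F") := by
  by_cases h : pvBit num i
  · rw [if_pos ((pvA_bit num i).mpr h), if_pos h]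
  · rw [if_neg (fun e => h ((pvA_bit num i).mp e)), if_neg h]

lemma pvA_norm (num : Int) :
    b_tobitl num = (List.range 32).reverse.map (fun i => if pvBit num i then "T" else "F") := by
  have hR : PySem.List.pyRange 31 (-1) (-1) =
      [31, 30, 29, 28, 27, 26, 25, 24, 23, 22, 21, 20, 19, 18, 17, 16, 15, 14, 13, 12, 11,
       10, 9, 8, 7, 6, 5, 4, 3, 2, 1, 0] := by decide
  have hRev : (List.range 32).reverse =
      [31, 30, 29, 28, 27, 26, 25, 24, 23, 22, 21, 20, 19, 18, 17, 16, 15, 14, 13, 12, 11,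
       10, 9, 8, 7, 6, 5, 4, 3, 2, 1, 0] := by decide
  unfold b_tobitl
  rw [hR, hRev]
  simp only [List.foldl, List.map, List.nil_append, List.cons_append, pvA_cond]
  rfl

lemma pvTDC : ∀ n : Nat, ∀ fuel ds, n ≤ fuel →
    Nat.toDigitsCore 2 (fuel + 1) n ds = (if n = 0 then ['0'] else pvBdigs n) ++ ds := by
  intro n
  induction n using Nat.strong_induction_on with
  | _ n ih =>
    intro fuel ds hle
    by_cases h0 : n = 0
    · subst h0
      simp [Nat.toDigitsCore, Nat.digitChar]
    · by_cases h1 : n / 2 = 0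
      · have hn1 : n = 1 := by omega
        subst hn1
        simp [Nat.toDigitsCore, Nat.digitChar, pvBdigs]
      · have h2 : 2 ≤ n := by omega
        obtain ⟨fuel', rfl⟩ : ∃ f, fuel = f + 1 := ⟨fuel - 1, by omega⟩
        have step : Nat.toDigitsCore 2 (fuel' + 1 + 1) n ds
            = Nat.toDigitsCore 2 (fuel' + 1) (n / 2) (Nat.digitChar (n % 2) :: ds) := by
          show (if n / 2 = 0 then _ else _) = _
          rw [if_neg h1]
        rw [step, ih (n / 2) (Nat.div_lt_self (by omega) (by norm_num)) fuel'
            (Nat.digitChar (n % 2) :: ds) (by omega), if_neg h1]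
        rw [pvBdigs_pos n (by omega)]
        have hd : Nat.digitChar (n % 2) = (if n % 2 = 1 then '1' else '0') := by
          rcases Nat.mod_two_eq_zero_or_one n with h | h <;> simp [h, Nat.digitChar]
        rw [hd, if_neg h0]
        simp

lemma pvPad : ∀ k n : Nat, n < 2 ^ k →
    List.replicate (k - (pvBdigs n).length) '0' ++ pvBdigs n
      = (List.range k).reverse.map (fun j => if n.testBit j then '1' else '0') := by
  intro k
  induction k with
  | zero =>
    intro n hn
    interval_cases n
    simp [pvBdigs]
  | succ k ih =>
    intro n hn
    by_cases h0 : n = 0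
    · subst h0
      simp only [pvBdigs, List.length_nil, Nat.sub_zero, List.append_nil]
      have : ∀ j, (Nat.testBit 0 j) = false := fun j => Nat.zero_testBit j
      simp [this, List.map_const']
    · rw [pvBdigs_pos n (by omega)]
      have hlen : (pvBdigs (n / 2) ++ [if n % 2 = 1 then '1' else '0']).length
          = (pvBdigs (n / 2)).length + 1 := by simp
      rw [hlen]
      have harith : k + 1 - ((pvBdigs (n / 2)).length + 1) = k - (pvBdigs (n / 2)).length := by omega
      rw [harith]
      have ihh := ih (n / 2) (by
        have := Nat.div_lt_self (Nat.pos_of_ne_zero h0) (show 1 < 2 by norm_num)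
        omega)
      rw [← List.append_assoc, ihh]
      rw [List.range_succ_eq_map]
      simp only [List.reverse_cons, List.map_append, List.map_map, List.map_reverse]
      congr 1
      · congr 1
        refine List.map_congr_left ?_
        intro j _
        simp [Function.comp, Nat.testBit_add_one]
      · simp [Nat.testBit_zero]

lemma pvB_norm (num : Int) :
    b_tobitl_alt num =
      (List.range 32).reverse.map
        (fun j => if ((PySem.Int.band num 4294967295).toNat).testBit j then "T" else "F") := by
  have hnn : 0 ≤ PySem.Int.band num 4294967295 := by
    rw [PySem.Int.band_comm]
    exact PySem.Int.band_nonneg_of_nonneg_left num (by norm_num)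
  set b := PySem.Int.band num 4294967295 with hb
  set m := b.toNat with hm
  have hmlt : m < 2 ^ 32 := by
    have hle : b ≤ 4294967295 := by
      rw [hb]
      unfold PySem.Int.band
      split_ifs with h1 h2 h2
      · exact_mod_cast Nat.le_trans (Nat.and_le_right)
          (by norm_num [Int.toNat_natCast] : (4294967295:ℤ).toNat ≤ 4294967295)
      · omega
      · have : (4294967295:ℤ).toNat - ((4294967295:ℤ).toNat &&& (-num - 1).toNat)
            ≤ (4294967295:ℤ).toNat := Nat.sub_le _ _
        omega
      · omega
    omega
  have hbin : PySem.Int.toBinChars b = (if m = 0 then ['0'] else pvBdigs m) := by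
    unfold PySem.Int.toBinChars
    rw [if_neg (by omega)]
    show Nat.toDigitsCore 2 (m + 1) m [] = _
    rw [pvTDC m m [] (le_refl m)]
    simp
  show (List.replicate (32 - (PySem.Int.toBinChars b).length) '0' ++ PySem.Int.toBinChars b).map
      (fun c => if c = '1' then "T" else "F") = _
  rw [hbin]
  have hpadded : List.replicate (32 - (if m = 0 then ['0'] else pvBdigs m).length) '0'
      ++ (if m = 0 then ['0'] else pvBdigs m)
      = (List.range 32).reverse.map (fun j => if m.testBit j then '1' else '0') := by
    by_cases h0 : m = 0
    · rw [if_pos h0]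
      have := pvPad 32 0 (by norm_num)
      simp only [pvBdigs, List.append_nil, List.length_nil, Nat.sub_zero] at this
      rw [h0, ← this]
      simp
    · rw [if_neg h0]
      exact pvPad 32 m hmlt
  rw [hpadded, List.map_map]
  refine List.map_congr_left ?_
  intro j _
  by_cases hbit : m.testBit j <;> simp [hbit, Function.comp]

-- ===== VERDICT (by name: the statement is the Claim_ definition above) =====
theorem b_tobitl_spec : Claim_equal_b_tobitl := by
  intro num _
  show b_tobitl num = b_tobitl_alt num
  rw [pvA_norm, pvB_norm]
  refine List.map_congr_left ?_
  intro j hj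
  have hj32 : j < 32 := List.mem_range.mp (List.mem_reverse.mp hj)
  rw [pvB_bit num j hj32]
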